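-- pv_equiv track=rewrite | github.com/I14Y-ch/structure_generator | csv_converter.py | _detect_enumeration_values
-- ===== SOURCE A (Python) =====
-- from typing import Optional, List, Dict, Any
--
-- def _detect_enumeration_values(values: List[str]) -> Optional[List[str]]:
--     """Detect enumeration values if same values appear at least 5 times."""
--     cleaned = [v.strip() for v in values if isinstance(v, str) and v.strip()]
--     if not cleaned:
--         return None
--
--     # Count occurrences of each value
--     value_counts = {}
--     for v in cleaned:
--         value_counts[v] = value_counts.get(v, 0) + 1
--
--     # Filter values that appear at least 5 times
--     frequent_values = [v for v, count in value_counts.items() if count >= 5]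
--
--     # Return sorted list if we found any frequent values
--     if frequent_values:
--         return sorted(frequent_values)
--
--     return None
-- ===== SOURCE B (Python) =====
-- from typing import Optional, List
--
-- def _detect_enumeration_values(values: List[str]) -> Optional[List[str]]:
--     """Detect enumeration values if same values appear at least 5 times."""
--     cleaned = [v.strip() for v in values if isinstance(v, str) and v.strip()]
--     if not cleaned:
--         return None
--
--     # Sort once, then collect values whose run of equal consecutive
--     # elements has length >= 5; the result comes out already sorted.
--     ordered = sorted(cleaned)
--     result = []
--     cur = ordered[0]
--     cnt = 1
--     for x in ordered[1:]:
--         if x == cur: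
--             cnt += 1
--         else:
--             if cnt >= 5:
--                 result.append(cur)
--             cur, cnt = x, 1
--     if cnt >= 5:
--         result.append(cur)
--
--     return result if result else None
-- ===== Notes on version B (the rewrite author's own statement) =====
-- stated objective: alternative
-- what changed: Replaces the dict-based counting pass plus filter plus final sort with a single sort followed by one run-length scan over the sorted list, which emits qualifying values already in sorted order.
import Mathlib
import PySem

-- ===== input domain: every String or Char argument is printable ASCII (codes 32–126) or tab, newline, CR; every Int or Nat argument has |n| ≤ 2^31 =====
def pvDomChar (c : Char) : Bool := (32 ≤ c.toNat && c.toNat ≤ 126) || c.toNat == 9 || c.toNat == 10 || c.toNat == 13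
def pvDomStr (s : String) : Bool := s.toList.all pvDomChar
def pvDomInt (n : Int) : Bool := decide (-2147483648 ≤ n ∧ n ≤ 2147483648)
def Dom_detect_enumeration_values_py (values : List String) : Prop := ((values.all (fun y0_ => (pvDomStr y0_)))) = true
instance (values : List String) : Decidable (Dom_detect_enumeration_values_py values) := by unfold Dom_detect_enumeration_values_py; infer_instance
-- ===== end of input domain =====

-- B replaces A's dict-count + filter + final sort by one sort followed by a run-length scan
-- that emits qualifying values already in sorted order (alternative decomposition, same cost class).


-- ===== PORT A =====
def detect_enumeration_values_py (values : List String) : Option (List String) :=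
  let cleaned := (values.filter (fun v => !(PySem.Str.strip v == ""))).map (fun v => PySem.Str.strip v)
  if cleaned = [] then none
  else
    -- value_counts = {}; for v in cleaned: value_counts[v] = value_counts.get(v, 0) + 1
    let value_counts := cleaned.foldl (fun d v => d.insert v (d.getD v 0 + 1)) PySem.Dict.empty
    -- frequent_values = [v for v, count in value_counts.items() if count >= 5]
    let frequent_values := (value_counts.items.filter (fun p => decide ((5 : Int) ≤ p.2))).map (fun p => p.1)
    if frequent_values = [] then none
    else some (PySem.List.sorted frequent_values (fun x => x))

-- ===== PORT B =====
-- run-length scan over the already-sorted list: cur/cnt track the current run, acc the output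
def pvRunScan : List String → String → Nat → List String → List String
  | [], cur, cnt, acc => if 5 ≤ cnt then acc ++ [cur] else acc
  | x :: xs, cur, cnt, acc =>
      if x = cur then pvRunScan xs cur (cnt + 1) acc
      else pvRunScan xs x 1 (if 5 ≤ cnt then acc ++ [cur] else acc)

def detect_enumeration_values_py_alt (values : List String) : Option (List String) :=
  let cleaned := (values.filter (fun v => !(PySem.Str.strip v == ""))).map (fun v => PySem.Str.strip v)
  if cleaned = [] then none
  else
    match PySem.List.sorted cleaned (fun x => x) with
    | [] => none   -- unreachable: sorted of a non-empty list is non-empty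
    | h :: t =>
        let result := pvRunScan t h 1 []
        if result = [] then none else some result

-- ===== PRECONDITION & SPEC =====
def Spec_detect_enumeration_values_py (values : List String) (out : Option (List String)) : Prop := out = detect_enumeration_values_py_alt values
instance (values : List String) (out : Option (List String)) : Decidable (Spec_detect_enumeration_values_py values out) := by unfold Spec_detect_enumeration_values_py; infer_instance

-- ===== CLAIM (what is proved, stated in full; the proofs are below) =====
def Claim_equal_detect_enumeration_values_py : Prop := ∀ (values : List String), Dom_detect_enumeration_values_py values → Spec_detect_enumeration_values_py values (detect_enumeration_values_py values)

-- ===== LEMMAS AND PROOFS =====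

lemma pv_discard_of_not_mem (l : List String) (x : String) (h : x ∉ l) :
    (PySem.Set.ofList l).discard x = PySem.Set.ofList l := by
  unfold PySem.Set.discard
  refine List.filter_eq_self.mpr ?_
  intro y hy
  have hyl : y ∈ l := (PySem.Set.mem_ofList l y).mp hy
  have : y ≠ x := fun e => h (e ▸ hyl)
  simp [this]

lemma pv_ofList_sublist (l : List String) : (PySem.Set.ofList l).Sublist l := by
  induction l with
  | nil => exact List.Sublist.refl []
  | cons x xs ih =>
    rw [PySem.Set.ofList_cons]
    refine List.Sublist.cons₂ x ?_
    unfold PySem.Set.discard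
    exact List.Sublist.trans List.filter_sublist ih

lemma pv_ofList_cons_dup (x : String) (xs : List String) :
    PySem.Set.ofList (x :: x :: xs) = PySem.Set.ofList (x :: xs) := by
  rw [PySem.Set.ofList_cons, PySem.Set.ofList_cons]
  unfold PySem.Set.discard
  simp [List.filter_filter]

lemma pvRunScan_spec (xs : List String) (cur : String) (cnt : Nat) (acc : List String)
    (hs : (cur :: xs).Pairwise (· ≤ ·)) :
    pvRunScan xs cur cnt acc =
      acc ++ (PySem.Set.ofList (cur :: xs)).filter
        (fun k => decide (5 ≤ xs.count k + (if k = cur then cnt else 0))) := by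
  induction xs generalizing cur cnt acc with
  | nil =>
    show (if 5 ≤ cnt then acc ++ [cur] else acc) = _
    have : PySem.Set.ofList [cur] = [cur] := rfl
    rw [this]
    by_cases h : 5 ≤ cnt <;> simp [h]
  | cons x xs ih =>
    by_cases hx : x = cur
    · subst hx
      rw [pvRunScan, if_pos rfl]
      rw [ih x (cnt + 1) acc hs.of_cons, pv_ofList_cons_dup]
      congr 1
      refine List.filter_congr ?_
      intro k _
      rw [decide_eq_decide]
      by_cases hk : k = x
      · subst hk; simp; omega
      · have hxk : (x == k) = false := beq_eq_false_iff_ne.mpr (fun e => hk e.symm)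
        simp [List.count_cons, hk, hxk]
    · rw [pvRunScan, if_neg hx]
      have htail : (x :: xs).Pairwise (· ≤ ·) := hs.of_cons
      have hcurle : ∀ y ∈ x :: xs, cur ≤ y := fun y hy => List.rel_of_pairwise_cons hs hy
      have hnot : cur ∉ x :: xs := by
        intro hmem
        rcases List.mem_cons.mp hmem with e | hmem2
        · exact hx e.symm
        · have h1 : x ≤ cur := List.rel_of_pairwise_cons htail hmem2
          have h2 : cur ≤ x := hcurle x List.mem_cons_self
          exact hx (le_antisymm h1 h2)
      rw [ih x 1 _ htail]
      rw [PySem.Set.ofList_cons cur (x :: xs), pv_discard_of_not_mem _ _ hnot]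
      have hcount0 : (x :: xs).count cur = 0 := List.count_eq_zero.mpr hnot
      simp only [List.filter_cons, if_true, hcount0, Nat.zero_add]
      have hrest : (PySem.Set.ofList (x :: xs)).filter
            (fun k => decide (5 ≤ (x :: xs).count k + (if k = cur then cnt else 0)))
          = (PySem.Set.ofList (x :: xs)).filter
            (fun k => decide (5 ≤ xs.count k + (if k = x then 1 else 0))) := by
        refine List.filter_congr ?_
        intro k hk
        have hkmem : k ∈ x :: xs := (PySem.Set.mem_ofList _ _).mp hk
        have hkne : k ≠ cur := fun e => hnot (e ▸ hkmem)
        by_cases hkx : k = x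
        · subst hkx; simp [hkne]
        · have : ¬ (x == k) = true := by simpa using fun h => hkx (by simpa using h.symm)
          simp [hkne, hkx, List.count_cons, this]
      rw [hrest]
      by_cases h5 : 5 ≤ cnt <;> simp [h5]

lemma pv_nat_int_pred (n : Nat) : decide ((5 : Int) ≤ (n : Int)) = decide (5 ≤ n) := by
  simp only [decide_eq_decide]
  exact_mod_cast Iff.rfl

-- ===== VERDICT (by name: the statement is the Claim_ definition above) =====
theorem detect_enumeration_values_py_spec : Claim_equal_detect_enumeration_values_py := by
  intro values _dom
  unfold Spec_detect_enumeration_values_py detect_enumeration_values_py detect_enumeration_values_py_alt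
  set c := (values.filter (fun v => !(PySem.Str.strip v == ""))).map (fun v => PySem.Str.strip v) with hc
  by_cases hnil : c = []
  · simp [hnil]
  · simp only [hnil, if_false]
    -- A's frequent_values as a filter of the deduped cleaned list
    rw [PySem.Dict.foldl_insert_getD_add_one_eq_counter, PySem.Dict.items_counter,
        List.filter_map, List.map_map]
    have hAF : ((PySem.Set.ofList c).filter
          ((fun p => decide ((5 : Int) ≤ p.2)) ∘ (fun k => (k, ((c.count k : Nat) : Int))))).map
          ((fun p : String × Int => p.1) ∘ (fun k => (k, ((c.count k : Nat) : Int))))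
        = (PySem.Set.ofList c).filter (fun k => decide (5 ≤ c.count k)) := by
      simp only [Function.comp_def]
      rw [List.map_id']
      exact List.filter_congr (fun k _ => pv_nat_int_pred (c.count k))
    rw [hAF]
    -- B's side
    have hsnil : PySem.List.sorted c (fun x => x) ≠ [] := by
      simpa [PySem.List.sorted_eq_nil_iff] using hnil
    obtain ⟨h, t, hst⟩ : ∃ h t, PySem.List.sorted c (fun x => x) = h :: t := by
      cases hx : PySem.List.sorted c (fun x => x) with
      | nil => exact absurd hx hsnil
      | cons a b => exact ⟨a, b, rfl⟩
    have hpair : (h :: t).Pairwise (· ≤ ·) := by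
      have := PySem.List.sorted_pairwise c (fun x => x)
      rwa [hst] at this
    have hperm : (h :: t).Perm c := by
      have := PySem.List.sorted_perm c (fun x => x) false
      rwa [hst] at this
    rw [hst]
    show _ = if pvRunScan t h 1 [] = [] then none else some (pvRunScan t h 1 [])
    rw [pvRunScan_spec t h 1 [] hpair, List.nil_append]
    -- identify B's filtered list
    have hres : (PySem.Set.ofList (h :: t)).filter
          (fun k => decide (5 ≤ t.count k + (if k = h then 1 else 0)))
        = (PySem.Set.ofList (h :: t)).filter (fun k => decide (5 ≤ c.count k)) := by
      refine List.filter_congr ?_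
      intro k _
      have h1 : (h :: t).count k = t.count k + (if k = h then 1 else 0) := by
        by_cases hk : k = h
        · subst hk; simp
        · have : ¬ (h == k) = true := by simpa using fun e => hk (by simpa using e.symm)
          simp [List.count_cons, hk, this]
      have h2 : (h :: t).count k = c.count k := hperm.count_eq k
      rw [← h1, h2]
    rw [hres]
    -- the two filtered lists are permutations of each other
    have hpermset : (PySem.Set.ofList (h :: t)).Perm (PySem.Set.ofList c) := by
      refine (List.perm_ext_iff_of_nodup (PySem.Set.nodup_ofList _) (PySem.Set.nodup_ofList _)).mpr ?_
      intro a
      rw [PySem.Set.mem_ofList, PySem.Set.mem_ofList]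
      exact hperm.mem_iff
    have hpermF : ((PySem.Set.ofList (h :: t)).filter (fun k => decide (5 ≤ c.count k))).Perm
        ((PySem.Set.ofList c).filter (fun k => decide (5 ≤ c.count k))) :=
      hpermset.filter _
    -- B's result is strictly increasing
    have hlt : ((PySem.Set.ofList (h :: t)).filter (fun k => decide (5 ≤ c.count k))).Pairwise (· < ·) := by
      have hle : (PySem.Set.ofList (h :: t)).Pairwise (· ≤ ·) :=
        List.Pairwise.sublist (pv_ofList_sublist (h :: t)) hpair
      have hne : (PySem.Set.ofList (h :: t)).Pairwise (· ≠ ·) := PySem.Set.nodup_ofList _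
      have hlt' : (PySem.Set.ofList (h :: t)).Pairwise (· < ·) :=
        (hle.and hne).imp (fun hab => lt_of_le_of_ne hab.1 hab.2)
      exact List.Pairwise.sublist List.filter_sublist hlt'
    -- so A's sorted frequent list IS B's result
    have hsortedeq : PySem.List.sorted ((PySem.Set.ofList c).filter (fun k => decide (5 ≤ c.count k))) (fun x => x)
        = (PySem.Set.ofList (h :: t)).filter (fun k => decide (5 ≤ c.count k)) :=
      PySem.List.sorted_eq_of_perm_of_pairwise_lt _ _ _ hpermF hlt
    by_cases hFnil : (PySem.Set.ofList c).filter (fun k => decide (5 ≤ c.count k)) = []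
    · have : (PySem.Set.ofList (h :: t)).filter (fun k => decide (5 ≤ c.count k)) = [] := by
        rw [hFnil] at hpermF; exact hpermF.eq_nil
      simp [hFnil, this]
    · have hBnil : (PySem.Set.ofList (h :: t)).filter (fun k => decide (5 ≤ c.count k)) ≠ [] := by
        intro e; rw [e] at hpermF; exact hFnil (hpermF.symm.eq_nil)
      simp [hFnil, hBnil, hsortedeq]
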